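-- pv_equiv track=rewrite | github.com/Peachypie98/programmers-python | 프로그래머스/레벨1/둘만의 암호.py | solution
-- ===== SOURCE A (Python) =====
-- def solution(s, skip, index):
--     book = {"a":1, "b":2, "c": 3, "d":4, "e":5, "f":6, "g":7, "h":8, "i":9, "j":10,
--             "k":11, "l":12, "m":13, "n":14, "o":15, "p":16, "q":17, "r":18, "s":19,
--             "t":20, "u":21, "v":22, "w":23, "x":24, "y":25, "z":26}
--     book_reversed = {v:k for k,v in book.items()}
--     tmp = []
--     answer = []
--     for i in s:
--         num = book.get(i)
--         num2 = num + index
--         for x in range(num+1,num2+1):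
--             if(x > 26):
--                 x -= 26
--             tmp.append(book_reversed.get(x))
--         while(check(tmp, skip) != False):
--             for char in skip:
--                 if(char in tmp):
--                     tmp.remove(char)
--             while(len(tmp) != index):
--                 num2 += 1
--                 if(num2 > 26):
--                     num2 -= 26
--                 tmp.append(book_reversed.get(num2))
--         answer.append(tmp[index-1])
--         tmp.clear()
--     return "".join(answer)
--
-- def check(tmp, skip):
--     for char in skip:
--         if(char in tmp):
--             return True
--     return False
-- ===== SOURCE B (Python) =====
-- def solution(s, skip, index):
--     alphabet = [chr(97 + i) for i in range(26)]
--     allowed = [c for c in alphabet if c not in skip]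
--     m = len(allowed)
--     out = []
--     for c in s:
--         k = sum(1 for a in allowed if a <= c)
--         out.append(allowed[(k + index - 1) % m])
--     return "".join(out)
-- ===== Notes on version B (the rewrite author's own statement) =====
-- stated objective: simpler
-- what changed: B replaces A's per-character simulation (building a scratch list of index letters, then repeatedly deleting skip letters and re-extending it until it stabilises) with a closed form: build the allowed-letter list once and pick allowed[(count_of_allowed_letters_<=_c + index - 1) % len(allowed)] for each character.
-- outside the precondition, e.g. on solution('z', 'a', 26): A raises TypeError, B returns 'b'; on solution('op', 'zbzbZ', 39): A returns 'ef', B returns 'fg'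
import Mathlib
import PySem

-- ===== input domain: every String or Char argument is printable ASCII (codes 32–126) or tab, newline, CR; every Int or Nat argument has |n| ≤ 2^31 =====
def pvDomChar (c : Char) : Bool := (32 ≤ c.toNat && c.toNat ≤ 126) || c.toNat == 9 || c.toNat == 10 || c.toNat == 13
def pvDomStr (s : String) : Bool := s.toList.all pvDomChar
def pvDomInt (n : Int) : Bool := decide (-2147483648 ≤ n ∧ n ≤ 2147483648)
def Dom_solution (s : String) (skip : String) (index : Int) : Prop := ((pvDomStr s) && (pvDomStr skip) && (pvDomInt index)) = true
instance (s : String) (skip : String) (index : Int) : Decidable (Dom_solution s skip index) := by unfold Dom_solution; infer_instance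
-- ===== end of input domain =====

-- B replaces A's per-character delete-and-refill simulation by a closed-form modular lookup in the
-- precomputed allowed-letter list (simpler: one formula per character instead of two nested loops).

-- ===== PORT A =====
-- the literal dict `book`
def pvBook : PySem.Dict String Int := PySem.Dict.ofList
  [("a",1),("b",2),("c",3),("d",4),("e",5),("f",6),("g",7),("h",8),("i",9),("j",10),
   ("k",11),("l",12),("m",13),("n",14),("o",15),("p",16),("q",17),("r",18),("s",19),
   ("t",20),("u",21),("v",22),("w",23),("x",24),("y",25),("z",26)]

-- book_reversed = {v:k for k,v in book.items()}
def pvBookRev : PySem.Dict Int String :=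
  pvBook.items.foldl (fun d kv => d.insert kv.2 kv.1) PySem.Dict.empty

-- helper `check(tmp, skip)`
def check (tmp : List String) (skip : String) : Bool :=
  skip.toList.any (fun ch => tmp.contains (String.singleton ch))

-- `for char in skip: if char in tmp: tmp.remove(char)`
def pvRemovePass (l : List Char) (tmp : List String) : List String :=
  l.foldl (fun t ch => if t.contains (String.singleton ch) then t.erase (String.singleton ch) else t) tmp

-- `while len(tmp) != index: num2 += 1; if num2 > 26: num2 -= 26; tmp.append(book_reversed.get(num2))`
-- (fuel makes the loop total; under Pre_ the fuel passed below is never exhausted)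
def pvExtend (index : Int) : Nat → List String → Int → List String × Int
  | 0, tmp, num2 => (tmp, num2)
  | fuel+1, tmp, num2 =>
    if (tmp.length : Int) = index then (tmp, num2)
    else
      let n1 := num2 + 1
      let n2 := if n1 > 26 then n1 - 26 else n1
      pvExtend index fuel (tmp ++ [(pvBookRev.get? n2).getD ""]) n2

-- `while check(tmp, skip) != False: …` (fuel only for totality)
def pvWhile (skip : String) (index : Int) : Nat → List String → Int → List String × Int
  | 0, tmp, num2 => (tmp, num2)
  | fuel+1, tmp, num2 =>
    if check tmp skip then
      let t1 := pvRemovePass skip.toList tmp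
      let st := pvExtend index (index.toNat + 1) t1 num2
      pvWhile skip index fuel st.1 st.2
    else (tmp, num2)

-- the body of `for i in s` (tmp is cleared at the end of each iteration, so it is per-character)
def pvCharStep (skip : String) (index : Int) (c : Char) : String :=
  let num := (pvBook.get? (String.singleton c)).getD 0
  let num2 := num + index
  let tmp0 := (PySem.List.pyRange (num+1) (num2+1) 1).map
      (fun x => (pvBookRev.get? (if x > 26 then x - 26 else x)).getD "")
  let st := pvWhile skip index (26 * index.toNat + 27) tmp0 num2
  PySem.List.pyGetD st.1 (index - 1) ""

def solution (s : String) (skip : String) (index : Int) : String :=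
  PySem.Str.join "" (s.toList.foldl (fun answer c => answer ++ [pvCharStep skip index c]) [])

-- ===== PORT B =====
def pvAlphabet : List Char := (List.range 26).map (fun i => Char.ofNat (97 + i))

def pvAllowed (skip : String) : List Char :=
  pvAlphabet.filter (fun ch => !(skip.toList.contains ch))

def solution_alt (s : String) (skip : String) (index : Int) : String :=
  let allowed := pvAllowed skip
  let m : Int := allowed.length
  String.ofList (s.toList.map (fun c =>
    let k : Int := (allowed.countP (fun a => a ≤ c) : Nat)
    allowed.getD (PySem.Int.mod (k + index - 1) m).toNat 'a'))

-- ===== PRECONDITION & SPEC =====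
-- For nonempty s, Pre_ excludes inputs where A does not return a well-defined value: non-lowercase
-- characters in s (TypeError on None+index), index < 1 (IndexError at tmp[index-1] or an infinite
-- extension loop), a skip covering all 26 letters (infinite loop), and letter/index combinations where
-- an alphabet position plus index passes 52 — or equals 52 with a lowercase letter in skip — where A's
-- single `-26` wrap feeds None into the scratch list, so A raises TypeError at join on most such
-- inputs and on the rest returns a string assembled while stepping over None entries; the empty s
-- (where A returns "" for any skip and index) and the boundary position+index = 52 with letter-free
-- skip (where A returns normally) are admitted.
def Pre_solution (s : String) (skip : String) (index : Int) : Prop :=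
  s.toList.map Char.toNat = [] ∨
  (1 ≤ index ∧
   (∀ c ∈ s.toList.map Char.toNat, 97 ≤ c ∧ c ≤ 122 ∧
     (((c : Int) - 96) + index ≤ 51 ∨
      (((c : Int) - 96) + index = 52 ∧
       ∀ h ∈ skip.toList.map Char.toNat, ¬(97 ≤ h ∧ h ≤ 122)))) ∧
   (∃ n ∈ List.range 26, (97 + n) ∉ skip.toList.map Char.toNat))

instance (s : String) (skip : String) (index : Int) : Decidable (Pre_solution s skip index) := by
  unfold Pre_solution; infer_instance

def pvWitness_solution : String × String × Int := ("abc", "b", 3)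

def Spec_solution (s : String) (skip : String) (index : Int) (out : String) : Prop :=
  out = solution_alt s skip index
instance (s : String) (skip : String) (index : Int) (out : String) : Decidable (Spec_solution s skip index out) := by
  unfold Spec_solution; infer_instance

-- ===== CLAIM (what is proved, stated in full; the proofs are below) =====
def Claim_equal_solution : Prop := ∀ (s : String) (skip : String) (index : Int),
  Dom_solution s skip index → Pre_solution s skip index → Spec_solution s skip index (solution s skip index)

-- ===== LEMMAS AND PROOFS =====

-- proof-side vocabulary: the cyclic letter sequence A walks through
def pvLetter (n : Nat) : String := String.singleton (Char.ofNat (96 + n))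
def pvSeg (num L : Nat) : List String := (List.range L).map (fun j => pvLetter ((num + j) % 26 + 1))
def pvSegFrom (num L d : Nat) : List String := (List.range d).map (fun j => pvLetter ((num + L + j) % 26 + 1))
def pvAllowedS (skip : String) (e : String) : Bool := !((skip.toList.map String.singleton).contains e)

lemma pvBookRev_getD (v : Int) (h1 : 1 ≤ v) (h2 : v ≤ 26) :
    (pvBookRev.get? v).getD "" = pvLetter v.toNat := by
  interval_cases v <;> decide

lemma pvBook_getD (n : Nat) (h1 : 97 ≤ n) (h2 : n ≤ 122) :
    (pvBook.get? (String.singleton (Char.ofNat n))).getD 0 = (n : Int) - 96 := by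
  interval_cases n <;> decide

lemma pvToNat_ofNat (m : Nat) (h : m < 55296) : (Char.ofNat m).toNat = m := by
  have hv : Nat.isValidChar m := Or.inl (by omega)
  unfold Char.ofNat
  split
  · rename_i hv'
    show (Char.ofNatAux m hv').val.toNat = m
    simp [Char.ofNatAux]
  · exact absurd hv (by assumption)

lemma pvCharLe (m : Nat) (c : Char) (hm : m < 55296) : (Char.ofNat m ≤ c) ↔ m ≤ c.toNat := by
  rw [Char.le_def, UInt32.le_iff_toNat_le]
  have : (Char.ofNat m).val.toNat = m := pvToNat_ofNat m hm
  rw [this]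
  rfl

lemma pvSingleton_inj {a b : Char} (h : String.singleton a = String.singleton b) : a = b := by
  have := congrArg String.toList h
  simpa using this

lemma pvSingleton_mem_map (ch : Char) (l : List Char) :
    (String.singleton ch ∈ l.map String.singleton) ↔ ch ∈ l := by
  simp only [List.mem_map]
  constructor
  · rintro ⟨a, ha, heq⟩; exact (pvSingleton_inj heq) ▸ ha
  · intro h; exact ⟨ch, h, rfl⟩

lemma pvAllowedS_singleton (skip : String) (ch : Char) :
    pvAllowedS skip (String.singleton ch) = !(skip.toList.contains ch) := by
  simp [pvAllowedS, pvSingleton_mem_map]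

lemma pvCheck_false_iff (tmp : List String) (skip : String) :
    check tmp skip = false ↔ ∀ e ∈ tmp, pvAllowedS skip e = true := by
  constructor
  · intro h e he
    simp only [check, List.any_eq_false] at h
    have hnot : e ∉ skip.toList.map String.singleton := by
      intro hmem
      obtain ⟨a, ha, rfl⟩ := List.mem_map.mp hmem
      have h2 := h a ha
      exact absurd he (by simpa using h2)
    unfold pvAllowedS
    simpa using hnot
  · intro h
    simp only [check, List.any_eq_false]
    intro ch hch
    by_cases hm : String.singleton ch ∈ tmp
    · have h2 := h _ hm
      unfold pvAllowedS at h2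
      simp only [Bool.not_eq_eq_eq_not, Bool.not_false, List.contains_eq_mem,
        decide_eq_true_eq] at h2
      exact absurd (List.mem_map.mpr ⟨ch, hch, rfl⟩) (by simpa using h2)
    · simpa using hm

lemma pvFilter_erase {α : Type} [DecidableEq α] (p : α → Bool) (l : List α) (a : α) (h : p a = false) :
    (l.erase a).filter p = l.filter p := by
  induction l with
  | nil => rfl
  | cons b t ih =>
    by_cases hb : b = a
    · subst hb
      simp [List.erase_cons_head, List.filter_cons, h]
    · rw [List.erase_cons_tail (by simpa using hb)]
      simp only [List.filter_cons]
      split <;> simp [ih]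

lemma pvRemovePass_cons (a : Char) (t : List Char) (tmp : List String) :
    pvRemovePass (a :: t) tmp
      = pvRemovePass t (if tmp.contains (String.singleton a)
          then tmp.erase (String.singleton a) else tmp) := rfl

lemma pvRemovePass_filter (skip : String) (l : List Char) :
    ∀ tmp : List String, (∀ ch ∈ l, ch ∈ skip.toList) →
    (pvRemovePass l tmp).filter (pvAllowedS skip) = tmp.filter (pvAllowedS skip) := by
  induction l with
  | nil => intro tmp _; rfl
  | cons ch t ih =>
    intro tmp h
    have hch : ch ∈ skip.toList := h ch (by simp)
    have hpa : pvAllowedS skip (String.singleton ch) = false := by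
      rw [pvAllowedS_singleton]
      simp [List.contains_eq_mem, hch]
    rw [pvRemovePass_cons, ih _ (fun c hc => h c (by simp [hc]))]
    split
    · rw [pvFilter_erase _ _ _ hpa]
    · rfl

lemma pvRemovePass_len_le (l : List Char) : ∀ tmp : List String,
    (pvRemovePass l tmp).length ≤ tmp.length := by
  induction l with
  | nil => intro tmp; exact le_refl _
  | cons ch t ih =>
    intro tmp
    rw [pvRemovePass_cons]
    refine le_trans (ih _) ?_
    split
    · exact List.length_erase_le
    · exact le_refl _

lemma pvRemovePass_len_lt (l : List Char) : ∀ tmp : List String,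
    (∃ ch ∈ l, String.singleton ch ∈ tmp) →
    (pvRemovePass l tmp).length < tmp.length := by
  induction l with
  | nil => intro tmp h; simp at h
  | cons a t ih =>
    intro tmp h
    rw [pvRemovePass_cons]
    by_cases hc : tmp.contains (String.singleton a)
    · rw [if_pos hc]
      have hmem : String.singleton a ∈ tmp := by simpa [List.contains_eq_mem] using hc
      have h1 : (tmp.erase (String.singleton a)).length = tmp.length - 1 :=
        List.length_erase_of_mem hmem
      have h2 := pvRemovePass_len_le t (tmp.erase (String.singleton a))
      have h3 : 0 < tmp.length := List.length_pos_of_mem hmem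
      omega
    · rw [if_neg hc]
      obtain ⟨ch, hcht, hchm⟩ := h
      rcases List.mem_cons.mp hcht with rfl | hcht'
      · exact absurd (by simpa [List.contains_eq_mem] using hchm) hc
      · exact ih tmp ⟨ch, hcht', hchm⟩

lemma pvSeg_add (num L d : Nat) : pvSeg num (L + d) = pvSeg num L ++ pvSegFrom num L d := by
  unfold pvSeg pvSegFrom
  rw [List.range_add, List.map_append, List.map_map]
  congr 1
  apply List.map_congr_left
  intro j _
  simp only [Function.comp_apply]
  congr 2
  omega

lemma pvSegFrom_eq_seg (num L : Nat) : pvSegFrom num 26 L = pvSeg num L := by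
  unfold pvSeg pvSegFrom
  apply List.map_congr_left
  intro j _
  congr 2
  omega

lemma pvSeg26_add (num L : Nat) : pvSeg num (26 + L) = pvSeg num 26 ++ pvSeg num L := by
  rw [pvSeg_add, pvSegFrom_eq_seg]

lemma pvSegFrom_cons (num L d : Nat) :
    pvSegFrom num L (d + 1) = pvLetter ((num + L) % 26 + 1) :: pvSegFrom num (L + 1) d := by
  unfold pvSegFrom
  rw [List.range_succ_eq_map, List.map_cons, List.map_map]
  congr 1
  apply List.map_congr_left
  intro j _
  simp only [Function.comp_apply]
  congr 1
  omega

lemma pvFill_eq (num : Nat) (index : Int) (h1 : 1 ≤ num) (h2 : num ≤ 26) (hi : 1 ≤ index)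
    (hb : (num : Int) + index ≤ 52) :
    (PySem.List.pyRange ((num : Int) + 1) ((num : Int) + index + 1) 1).map
      (fun x => (pvBookRev.get? (if x > 26 then x - 26 else x)).getD "")
      = pvSeg num index.toNat := by
  rw [PySem.List.pyRange_one, List.map_map]
  have hlen : ((num : Int) + index + 1 - ((num : Int) + 1)).toNat = index.toNat := by omega
  rw [hlen]
  unfold pvSeg
  apply List.map_congr_left
  intro j hj
  rw [List.mem_range] at hj
  simp only [Function.comp_apply]
  set x : Int := (num : Int) + 1 + (j : Int) with hx
  have hxb : 2 ≤ x ∧ x ≤ 52 := by constructor <;> omega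
  by_cases h26 : x > 26
  · rw [if_pos h26]
    rw [pvBookRev_getD (x - 26) (by omega) (by omega)]
    unfold pvLetter
    congr 2
    omega
  · rw [if_neg h26]
    rw [pvBookRev_getD x (by omega) (by omega)]
    unfold pvLetter
    congr 2
    omega

lemma pvExtend_spec (index : Int) (num : Nat) (h2 : num ≤ 26) (hi : 1 ≤ index) :
    ∀ (d fuel : Nat) (tmp : List String) (num2 : Int) (L : Nat),
    tmp.length + d = index.toNat → d ≤ fuel →
    1 ≤ num2 → num2 ≤ 51 → num2 % 26 = ((num : Int) + L) % 26 →
    ∃ num2', pvExtend index fuel tmp num2 = (tmp ++ pvSegFrom num L d, num2') ∧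
      1 ≤ num2' ∧ num2' ≤ 51 ∧ num2' % 26 = ((num : Int) + L + d) % 26 := by
  intro d
  induction d with
  | zero =>
    intro fuel tmp num2 L hlen _ ha hb hm
    have hstop : (tmp.length : Int) = index := by omega
    refine ⟨num2, ?_, ha, hb, by simpa using hm⟩
    cases fuel with
    | zero => simp [pvExtend, pvSegFrom]
    | succ f => simp [pvExtend, hstop, pvSegFrom]
  | succ d ih =>
    intro fuel tmp num2 L hlen hfuel ha hb hm
    cases fuel with
    | zero => omega
    | succ f =>
      have hne : ¬ ((tmp.length : Int) = index) := by omega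
      rw [pvExtend, if_neg hne]
      set n1 : Int := num2 + 1 with hn1
      have h52 : n1 ≤ 52 := by omega
      set n2 : Int := if n1 > 26 then n1 - 26 else n1 with hn2
      have hn2b : 1 ≤ n2 ∧ n2 ≤ 26 := by
        rw [hn2]; split <;> omega
      have hn2m : n2 % 26 = ((num : Int) + L + 1) % 26 := by
        rw [hn2]; split <;> omega
      have hv : (pvBookRev.get? n2).getD "" = pvLetter n2.toNat :=
        pvBookRev_getD n2 hn2b.1 hn2b.2
      have hval : n2.toNat = (num + L) % 26 + 1 := by omega
      obtain ⟨num2', heq, p1, p2, p3⟩ :=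
        ih f (tmp ++ [(pvBookRev.get? n2).getD ""]) n2 (L + 1)
          (by simp; omega) (by omega) hn2b.1 (by omega)
          (by rw [hn2m]; push_cast; ring_nf)
      refine ⟨num2', ?_, p1, p2, ?_⟩
      · rw [heq, hv, hval, List.append_assoc, pvSegFrom_cons]
        simp
      · rw [p3]; congr 1; push_cast; ring

lemma pvF26_pos (skip : String) (num : Nat)
    (hallow : ∃ n ∈ List.range 26, Char.ofNat (97 + n) ∉ skip.toList) :
    0 < ((pvSeg num 26).filter (pvAllowedS skip)).length := by
  obtain ⟨n, hn, hnotin⟩ := hallow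
  rw [List.mem_range] at hn
  have hmem : pvLetter (n + 1) ∈ pvSeg num 26 := by
    unfold pvSeg
    rw [List.mem_map]
    refine ⟨(n + 26 - num % 26) % 26, ?_, ?_⟩
    · rw [List.mem_range]; omega
    · congr 1
      omega
  have hall : pvAllowedS skip (pvLetter (n + 1)) = true := by
    unfold pvLetter
    rw [pvAllowedS_singleton]
    simp only [List.contains_eq_mem, Bool.not_eq_true', decide_eq_false_iff_not]
    rw [show 96 + (n + 1) = 97 + n from by omega]
    exact hnotin
  exact List.length_pos_of_mem (List.mem_filter.mpr ⟨hmem, hall⟩)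

lemma pvF_lower (skip : String) (num : Nat)
    (hallow : ∃ n ∈ List.range 26, Char.ofNat (97 + n) ∉ skip.toList) :
    ∀ L : Nat, L ≤ 26 * ((pvSeg num L).filter (pvAllowedS skip)).length + 25 := by
  intro L
  induction L using Nat.strong_induction_on with
  | _ L ih =>
    by_cases h : L < 26
    · omega
    · rw [show L = 26 + (L - 26) from by omega, pvSeg26_add, List.filter_append,
        List.length_append]
      have h1 := pvF26_pos skip num hallow
      have h2 := ih (L - 26) (by omega)
      omega

lemma pvWhile_spec (skip : String) (index : Int) (num : Nat) (h2 : num ≤ 26)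
    (hallow : ∃ n ∈ List.range 26, Char.ofNat (97 + n) ∉ skip.toList) (hi : 1 ≤ index) :
    ∀ (fuel L : Nat) (tmp : List String) (num2 : Int),
    tmp.length = index.toNat →
    tmp.filter (pvAllowedS skip) = (pvSeg num L).filter (pvAllowedS skip) →
    1 ≤ num2 → num2 ≤ 51 → num2 % 26 = ((num : Int) + L) % 26 →
    26 * index.toNat + 26 ≤ fuel + L →
    ∃ L', (pvWhile skip index fuel tmp num2).1 = (pvSeg num L').filter (pvAllowedS skip) ∧
      ((pvSeg num L').filter (pvAllowedS skip)).length = index.toNat := by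
  intro fuel
  induction fuel with
  | zero =>
    intro L tmp num2 hlen hfilt _ _ _ hfuel
    exfalso
    have hF := pvF_lower skip num hallow L
    have h1 : ((pvSeg num L).filter (pvAllowedS skip)).length ≤ tmp.length := by
      rw [← hfilt]; exact List.length_filter_le _ _
    omega
  | succ f ih =>
    intro L tmp num2 hlen hfilt ha hb hm hfuel
    rw [pvWhile]
    by_cases hch : check tmp skip
    · rw [if_pos hch]
      have hwit : ∃ ch ∈ skip.toList, String.singleton ch ∈ tmp := by
        have := hch
        simp only [check, List.any_eq_true] at this
        obtain ⟨ch, hm1, hm2⟩ := this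
        exact ⟨ch, hm1, by simpa [List.contains_eq_mem] using hm2⟩
      set t1 := pvRemovePass skip.toList tmp with ht1
      have hlt : t1.length < tmp.length := pvRemovePass_len_lt _ _ hwit
      have hf1 : t1.filter (pvAllowedS skip) = tmp.filter (pvAllowedS skip) :=
        pvRemovePass_filter skip skip.toList tmp (fun _ hc => hc)
      set d := index.toNat - t1.length with hd
      have hd1 : 1 ≤ d := by omega
      obtain ⟨num2', hext, p1, p2, p3⟩ :=
        pvExtend_spec index num h2 hi d (index.toNat + 1) t1 num2 L
          (by omega) (by omega) ha hb hm
      have hlen2 : (t1 ++ pvSegFrom num L d).length = index.toNat := by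
        rw [List.length_append]
        unfold pvSegFrom
        rw [List.length_map, List.length_range]
        omega
      have hfilt2 : (t1 ++ pvSegFrom num L d).filter (pvAllowedS skip)
          = (pvSeg num (L + d)).filter (pvAllowedS skip) := by
        rw [List.filter_append, hf1, hfilt, pvSeg_add, List.filter_append]
      have hrec := ih (L + d) (t1 ++ pvSegFrom num L d) num2' hlen2 hfilt2 p1 p2
        (by rw [p3]; congr 1; push_cast; ring) (by omega)
      show ∃ L', (pvWhile skip index f
          (pvExtend index (index.toNat + 1) (pvRemovePass skip.toList tmp) num2).1
          (pvExtend index (index.toNat + 1) (pvRemovePass skip.toList tmp) num2).2).1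
          = (pvSeg num L').filter (pvAllowedS skip) ∧
          ((pvSeg num L').filter (pvAllowedS skip)).length = index.toNat
      rw [← ht1, hext]
      exact hrec
    · rw [if_neg hch]
      refine ⟨L, ?_, ?_⟩
      · show tmp = (pvSeg num L).filter (pvAllowedS skip)
        have hself : tmp.filter (pvAllowedS skip) = tmp :=
          List.filter_eq_self.mpr (pvCheck_false_iff tmp skip |>.mp (by simpa using hch))
        rw [← hfilt, hself]
      · rw [← hfilt]
        have hself : tmp.filter (pvAllowedS skip) = tmp :=
          List.filter_eq_self.mpr (pvCheck_false_iff tmp skip |>.mp (by simpa using hch))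
        rw [hself, hlen]

lemma pvF_mul (skip : String) (num : Nat) :
    ∀ q : Nat, ((pvSeg num (26 * q)).filter (pvAllowedS skip)).length
      = q * ((pvSeg num 26).filter (pvAllowedS skip)).length := by
  intro q
  induction q with
  | zero => simp [pvSeg]
  | succ q ih =>
    rw [show 26 * (q + 1) = 26 + 26 * q from by ring, pvSeg26_add, List.filter_append,
      List.length_append, ih]
    ring

lemma pvRep_get (skip : String) (num : Nat) :
    ∀ (q i : Nat) (hi : i < ((pvSeg num (26 * q)).filter (pvAllowedS skip)).length),
    ((pvSeg num (26 * q)).filter (pvAllowedS skip))[i] =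
      ((pvSeg num 26).filter (pvAllowedS skip))[i % ((pvSeg num 26).filter (pvAllowedS skip)).length]'
        (Nat.mod_lt _ (by
          rcases Nat.eq_zero_or_pos ((pvSeg num 26).filter (pvAllowedS skip)).length with h | h
          · rw [pvF_mul, h, Nat.mul_zero] at hi; exact absurd hi (Nat.not_lt_zero _)
          · exact h)) := by
  intro q
  induction q with
  | zero =>
    intro i hi
    simp [pvSeg] at hi
  | succ q ih =>
    intro i hi
    have hsplit : (pvSeg num (26 * (q + 1))).filter (pvAllowedS skip)
        = (pvSeg num 26).filter (pvAllowedS skip) ++ (pvSeg num (26 * q)).filter (pvAllowedS skip) := by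
      rw [show 26 * (q + 1) = 26 + 26 * q from by ring, pvSeg26_add, List.filter_append]
    have hlen : ((pvSeg num (26 * (q + 1))).filter (pvAllowedS skip)).length
        = ((pvSeg num 26).filter (pvAllowedS skip)).length
          + ((pvSeg num (26 * q)).filter (pvAllowedS skip)).length := by
      rw [hsplit, List.length_append]
    rcases Nat.lt_or_ge i ((pvSeg num 26).filter (pvAllowedS skip)).length with hcase | hcase
    · rw [List.getElem_of_eq hsplit hi, List.getElem_append_left hcase]
      congr 1
      exact (Nat.mod_eq_of_lt hcase).symm
    · have hi' : i - ((pvSeg num 26).filter (pvAllowedS skip)).length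
          < ((pvSeg num (26 * q)).filter (pvAllowedS skip)).length := by omega
      rw [List.getElem_of_eq hsplit hi, List.getElem_append_right hcase, ih _ hi']
      congr 1
      conv_rhs => rw [show i = (i - ((pvSeg num 26).filter (pvAllowedS skip)).length)
        + ((pvSeg num 26).filter (pvAllowedS skip)).length from by omega]
      rw [Nat.add_mod_right]

-- the split of the alphabet at the input letter
def pvLE (num : Nat) : List Char := (List.range num).map (fun i => Char.ofNat (97 + i))
def pvGT (num : Nat) : List Char := (List.range (26 - num)).map (fun i => Char.ofNat (97 + num + i))

lemma pvAlpha_split (num : Nat) (h2 : num ≤ 26) : pvAlphabet = pvLE num ++ pvGT num := by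
  unfold pvAlphabet pvLE pvGT
  conv_lhs => rw [show (26 : Nat) = num + (26 - num) from by omega]
  rw [List.range_add, List.map_append, List.map_map]
  congr 1
  apply List.map_congr_left
  intro j _
  simp only [Function.comp_apply]
  congr 1
  omega

lemma pvAlpha_rot (num : Nat) (h2 : num ≤ 26) :
    pvAlphabet.rotate num = pvGT num ++ pvLE num := by
  rw [pvAlpha_split num h2]
  have hL : (pvLE num).length = num := by simp [pvLE]
  generalize hA : pvLE num = A at *
  generalize hB : pvGT num = B at *
  subst hL
  have hlen : A.length ≤ (A ++ B).length := by simp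
  rw [List.rotate_eq_drop_append_take hlen, List.drop_left, List.take_left]

lemma pvSeg26_eq (num : Nat) (h1 : 1 ≤ num) (h2 : num ≤ 26) :
    pvSeg num 26 = (pvGT num ++ pvLE num).map String.singleton := by
  have hr : List.range 26 = List.range (26 - num) ++ (List.range num).map (fun i => (26 - num) + i) := by
    conv_lhs => rw [show (26 : Nat) = (26 - num) + num from by omega]
    exact List.range_add
  unfold pvSeg pvGT pvLE
  rw [List.map_append, List.map_map, List.map_map, hr, List.map_append, List.map_map]
  congr 1
  · apply List.map_congr_left
    intro j hj
    rw [List.mem_range] at hj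
    simp only [Function.comp_apply]
    unfold pvLetter
    congr 2
    omega
  · apply List.map_congr_left
    intro j hj
    rw [List.mem_range] at hj
    simp only [Function.comp_apply]
    unfold pvLetter
    congr 2
    omega

lemma pvFilterMapSingleton (skip : String) (l : List Char) :
    (l.map String.singleton).filter (pvAllowedS skip)
      = (l.filter (fun ch => !(skip.toList.contains ch))).map String.singleton := by
  rw [List.filter_map]
  exact congrArg _ (List.filter_congr (fun ch _ => by
    simpa using pvAllowedS_singleton skip ch))

lemma pvRotFilter (skip : String) (num : Nat) (c : Char) (h1 : 1 ≤ num) (h2 : num ≤ 26)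
    (hc : c.toNat = 96 + num) :
    (pvAlphabet.rotate num).filter (fun ch => !(skip.toList.contains ch))
      = (pvAllowed skip).rotate ((pvAllowed skip).countP (fun a => a ≤ c)) := by
  rw [pvAlpha_rot num h2, List.filter_append]
  unfold pvAllowed
  rw [pvAlpha_split num h2, List.filter_append]
  have hkLE : ∀ a ∈ (pvLE num).filter (fun ch => !(skip.toList.contains ch)),
      (decide (a ≤ c)) = true := by
    intro a ha
    obtain ⟨i, hi, rfl⟩ := List.mem_map.mp (List.mem_filter.mp ha).1
    rw [List.mem_range] at hi
    rw [decide_eq_true_iff]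
    exact (pvCharLe _ c (by omega)).mpr (by omega)
  have hkGT : ∀ a ∈ (pvGT num).filter (fun ch => !(skip.toList.contains ch)),
      ¬ ((decide (a ≤ c)) = true) := by
    intro a ha
    obtain ⟨i, hi, rfl⟩ := List.mem_map.mp (List.mem_filter.mp ha).1
    rw [List.mem_range] at hi
    rw [decide_eq_true_iff]
    intro hle
    have := (pvCharLe _ c (by omega)).mp hle
    omega
  have hk : ((pvLE num).filter (fun ch => !(skip.toList.contains ch))
        ++ (pvGT num).filter (fun ch => !(skip.toList.contains ch))).countP
        (fun a => decide (a ≤ c))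
      = ((pvLE num).filter (fun ch => !(skip.toList.contains ch))).length := by
    rw [List.countP_append, List.countP_eq_length.mpr hkLE,
      List.countP_eq_zero.mpr hkGT]
    omega
  rw [hk]
  rw [List.rotate_eq_drop_append_take (by rw [List.length_append]; omega)]
  rw [List.drop_left, List.take_left]

lemma pvPrefix_filter_seg (skip : String) (num : Nat) (L1 L2 : Nat) (h : L1 ≤ L2) :
    (pvSeg num L1).filter (pvAllowedS skip) <+: (pvSeg num L2).filter (pvAllowedS skip) := by
  rw [show L2 = L1 + (L2 - L1) from by omega, pvSeg_add, List.filter_append]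
  exact List.prefix_append _ _

lemma pvCharStep_eq (skip : String) (index : Int) (c : Char)
    (h1 : 1 ≤ index) (h97 : 97 ≤ c.toNat) (h122 : c.toNat ≤ 122)
    (hb : ((c.toNat : Int) - 96) + index ≤ 51)
    (hallow : ∃ n ∈ List.range 26, Char.ofNat (97 + n) ∉ skip.toList) :
    pvCharStep skip index c = String.singleton
      ((pvAllowed skip).getD
        (PySem.Int.mod ((((pvAllowed skip).countP (fun a => a ≤ c) : Nat) : Int) + index - 1)
          ((pvAllowed skip).length : Int)).toNat 'a') := by
  obtain ⟨n, hn97, hn122, rfl⟩ : ∃ n, 97 ≤ n ∧ n ≤ 122 ∧ c = Char.ofNat n :=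
    ⟨c.toNat, h97, h122, (Char.ofNat_toNat c).symm⟩
  have htn : (Char.ofNat n).toNat = n := pvToNat_ofNat n (by omega)
  rw [htn] at h97 h122 hb
  set num : Nat := n - 96 with hnumdef
  set I : Nat := index.toNat with hIdef
  have hI : (I : Int) = index := by omega
  set k : Nat := (pvAllowed skip).countP (fun a => a ≤ Char.ofNat n) with hkdef
  set m : Nat := (pvAllowed skip).length with hmdef
  -- evaluate the while loop
  obtain ⟨L', hw, hwlen⟩ := pvWhile_spec skip index num (by omega) hallow h1
    (26 * I + 27) I (pvSeg num I) ((num : Int) + index)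
    (by simp [pvSeg]; exact hIdef) rfl (by omega) (by omega) (by rw [hI]) (by omega)
  have hrotlen : 0 < ((pvSeg num 26).filter (pvAllowedS skip)).length :=
    pvF26_pos skip num hallow
  -- the repeated-window list
  have hTl : ((pvSeg num (26 * I)).filter (pvAllowedS skip)).length
      = I * ((pvSeg num 26).filter (pvAllowedS skip)).length := pvF_mul skip num I
  have hTge : I ≤ ((pvSeg num (26 * I)).filter (pvAllowedS skip)).length := by
    rw [hTl]; exact Nat.le_mul_of_pos_right _ hrotlen
  -- the window as a rotation of the allowed list
  have hrot : (pvSeg num 26).filter (pvAllowedS skip)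
      = ((pvAllowed skip).rotate k).map String.singleton := by
    rw [pvSeg26_eq num (by omega) (by omega), pvFilterMapSingleton]
    rw [← pvAlpha_rot num (by omega)]
    rw [pvRotFilter skip num (Char.ofNat n) (by omega) (by omega) (by omega)]
  have hmpos : 0 < m := by
    have := hrotlen
    rw [hrot, List.length_map, List.length_rotate] at this
    exact this
  -- A's answer
  show PySem.List.pyGetD (pvWhile skip index (26 * index.toNat + 27)
      ((PySem.List.pyRange ((pvBook.get? (String.singleton (Char.ofNat n))).getD 0 + 1)
          ((pvBook.get? (String.singleton (Char.ofNat n))).getD 0 + index + 1) 1).map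
        (fun x => (pvBookRev.get? (if x > 26 then x - 26 else x)).getD ""))
      ((pvBook.get? (String.singleton (Char.ofNat n))).getD 0 + index)).1 (index - 1) ""
    = _
  rw [pvBook_getD n hn97 hn122]
  rw [show (n : Int) - 96 = ((num : Nat) : Int) from by omega]
  rw [pvFill_eq num index (by omega) (by omega) h1 (by omega)]
  rw [← hIdef]
  rw [hw]
  have hL1 : ((pvSeg num L').filter (pvAllowedS skip)).length = I := hwlen
  rw [PySem.List.pyGetD_eq_getElem _ _ (by omega) (by rw [hL1]; omega)]
  have hidx : (index - 1).toNat = I - 1 := by omega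
  simp only [hidx]
  have hstep : ((pvSeg num L').filter (pvAllowedS skip))[I - 1]'(by omega)
      = ((pvSeg num (26 * I)).filter (pvAllowedS skip))[I - 1]'(by omega) := by
    rcases le_total L' (26 * I) with hle | hle
    · exact List.IsPrefix.getElem (pvPrefix_filter_seg skip num L' (26 * I) hle) _
    · exact (List.IsPrefix.getElem (pvPrefix_filter_seg skip num (26 * I) L' hle) _).symm
  rw [hstep]
  rw [pvRep_get skip num I (I - 1) (by omega)]
  -- pass to the rotation of the allowed list
  simp only [hrot, List.length_map, List.length_rotate]
  rw [List.getElem_map, List.getElem_rotate]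
  simp only [← hmdef]
  -- B's index
  have hBidx : (PySem.Int.mod ((k : Int) + index - 1) (m : Int)).toNat = (k + I - 1) % m := by
    rw [show (k : Int) + index - 1 = ((k + I - 1 : Nat) : Int) from by omega]
    rw [PySem.Int.mod_natCast]
    exact Int.toNat_natCast _
  rw [hBidx]
  rw [List.getD_eq_getElem _ 'a' (Nat.mod_lt _ hmpos)]
  have hidxeq : ((I - 1) % m + k) % m = (k + I - 1) % m := by
    rw [Nat.mod_add_mod]
    congr 1
    omega
  simp only [hidxeq]
  rfl

-- the boundary case position + index = 52: no skip letter is lowercase, so A's while loop never fires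
lemma pvWhile_stop (skip : String) (index : Int) (tmp : List String) (num2 : Int)
    (h : check tmp skip = false) :
    ∀ fuel, pvWhile skip index fuel tmp num2 = (tmp, num2) := by
  intro fuel
  cases fuel with
  | zero => rfl
  | succ f => rw [pvWhile, if_neg (by simp [h])]

lemma pvAllowed_all (skip : String)
    (hskip : ∀ ch ∈ skip.toList, ¬(97 ≤ ch.toNat ∧ ch.toNat ≤ 122)) :
    pvAllowed skip = pvAlphabet := by
  unfold pvAllowed
  apply List.filter_eq_self.mpr
  intro a ha
  simp only [List.contains_eq_mem, Bool.not_eq_true', decide_eq_false_iff_not]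
  intro hmem
  unfold pvAlphabet at ha
  obtain ⟨i, hi, rfl⟩ := List.mem_map.mp ha
  rw [List.mem_range] at hi
  have := pvToNat_ofNat (97 + i) (by omega)
  exact hskip _ hmem ⟨by omega, by omega⟩

lemma pvCountAlpha (n : Nat) (h97 : 97 ≤ n) (h122 : n ≤ 122) :
    pvAlphabet.countP (fun a => a ≤ Char.ofNat n) = n - 96 := by
  set num : Nat := n - 96 with hnum
  rw [pvAlpha_split num (by omega), List.countP_append]
  have hLE : ∀ a ∈ pvLE num, (decide (a ≤ Char.ofNat n)) = true := by
    intro a ha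
    obtain ⟨i, hi, rfl⟩ := List.mem_map.mp ha
    rw [List.mem_range] at hi
    rw [decide_eq_true_iff]
    exact (pvCharLe _ _ (by omega)).mpr (by rw [pvToNat_ofNat n (by omega)]; omega)
  have hGT : ∀ a ∈ pvGT num, ¬ ((decide (a ≤ Char.ofNat n)) = true) := by
    intro a ha
    obtain ⟨i, hi, rfl⟩ := List.mem_map.mp ha
    rw [List.mem_range] at hi
    rw [decide_eq_true_iff]
    intro hle
    have := (pvCharLe _ _ (by omega)).mp hle
    rw [pvToNat_ofNat n (by omega)] at this
    omega
  rw [List.countP_eq_length.mpr hLE, List.countP_eq_zero.mpr hGT]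
  simp [pvLE]

lemma pvCharStep_eq52 (skip : String) (index : Int) (c : Char)
    (h1 : 1 ≤ index) (h97 : 97 ≤ c.toNat) (h122 : c.toNat ≤ 122)
    (hb : ((c.toNat : Int) - 96) + index = 52)
    (hskip : ∀ ch ∈ skip.toList, ¬(97 ≤ ch.toNat ∧ ch.toNat ≤ 122)) :
    pvCharStep skip index c = String.singleton
      ((pvAllowed skip).getD
        (PySem.Int.mod ((((pvAllowed skip).countP (fun a => a ≤ c) : Nat) : Int) + index - 1)
          ((pvAllowed skip).length : Int)).toNat 'a') := by
  obtain ⟨n, hn97, hn122, rfl⟩ : ∃ n, 97 ≤ n ∧ n ≤ 122 ∧ c = Char.ofNat n :=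
    ⟨c.toNat, h97, h122, (Char.ofNat_toNat c).symm⟩
  have htn : (Char.ofNat n).toNat = n := pvToNat_ofNat n (by omega)
  rw [htn] at h97 h122 hb
  set num : Nat := n - 96 with hnumdef
  set I : Nat := index.toNat with hIdef
  have hI : (I : Int) = index := by omega
  have hnum52 : num + I = 52 := by omega
  -- the initial segment never contains a skip character (skip has no lowercase letter)
  have hchk : check (pvSeg num I) skip = false := by
    rw [pvCheck_false_iff]
    intro e he
    unfold pvSeg at he
    obtain ⟨j, _, rfl⟩ := List.mem_map.mp he
    unfold pvLetter
    rw [pvAllowedS_singleton]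
    simp only [List.contains_eq_mem, Bool.not_eq_true', decide_eq_false_iff_not]
    intro hmem
    have htj : (Char.ofNat (96 + ((num + j) % 26 + 1))).toNat = 96 + ((num + j) % 26 + 1) :=
      pvToNat_ofNat _ (by omega)
    have hmod : (num + j) % 26 < 26 := Nat.mod_lt _ (by omega)
    exact hskip _ hmem ⟨by omega, by omega⟩
  -- A's answer
  show PySem.List.pyGetD (pvWhile skip index (26 * index.toNat + 27)
      ((PySem.List.pyRange ((pvBook.get? (String.singleton (Char.ofNat n))).getD 0 + 1)
          ((pvBook.get? (String.singleton (Char.ofNat n))).getD 0 + index + 1) 1).map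
        (fun x => (pvBookRev.get? (if x > 26 then x - 26 else x)).getD ""))
      ((pvBook.get? (String.singleton (Char.ofNat n))).getD 0 + index)).1 (index - 1) ""
    = _
  rw [pvBook_getD n hn97 hn122]
  rw [show (n : Int) - 96 = ((num : Nat) : Int) from by omega]
  rw [pvFill_eq num index (by omega) (by omega) h1 (by omega)]
  rw [← hIdef]
  rw [pvWhile_stop skip index _ _ hchk]
  show PySem.List.pyGetD (pvSeg num I) (index - 1) "" = _
  have hlenSeg : (pvSeg num I).length = I := by simp [pvSeg]
  rw [PySem.List.pyGetD_eq_getElem _ _ (by omega) (by push_cast [hlenSeg]; omega)]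
  have hidx : (index - 1).toNat = I - 1 := by omega
  simp only [hidx]
  -- A's value is the last letter of the segment, i.e. 'z'
  have hA : (pvSeg num I)[I - 1]'(by omega) = pvLetter 26 := by
    unfold pvSeg
    rw [List.getElem_map, List.getElem_range]
    congr 1
    omega
  rw [hA]
  -- B's value
  rw [pvAllowed_all skip hskip, pvCountAlpha n h97 h122, ← hnumdef]
  have hlenA : (pvAlphabet.length : Int) = 26 := by decide
  rw [hlenA]
  rw [show ((num : Nat) : Int) + index - 1 = 51 from by omega]
  decide

-- ===== VERDICT (by name: the statement is the Claim_ definition above) =====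
theorem solution_spec : Claim_equal_solution := by
  intro s skip index hdom hpre
  rcases hpre with hnil | ⟨hi, hall, hallow1⟩
  · rw [List.map_eq_nil_iff] at hnil
    unfold Spec_solution solution solution_alt
    rw [hnil]
    rfl
  unfold Spec_solution solution solution_alt
  rw [PySem.List.foldl_append_singleton_eq_map]
  rw [List.nil_append]
  apply String.ext
  rw [PySem.Str.toList_join]
  have hmap : s.toList.map (pvCharStep skip index)
      = s.toList.map (fun c => String.singleton
          ((pvAllowed skip).getD
            (PySem.Int.mod ((((pvAllowed skip).countP (fun a => a ≤ c) : Nat) : Int) + index - 1)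
              ((pvAllowed skip).length : Int)).toNat 'a')) := by
    apply List.map_congr_left
    intro c hc
    have hallow : ∃ n ∈ List.range 26, Char.ofNat (97 + n) ∉ skip.toList := by
      obtain ⟨n, hn, hnotin⟩ := hallow1
      refine ⟨n, hn, fun hmem => hnotin ?_⟩
      have := List.mem_map_of_mem (f := Char.toNat) hmem
      rw [List.mem_range] at hn
      rwa [pvToNat_ofNat (97 + n) (by omega)] at this
    obtain ⟨hc1, hc2, hc3⟩ := hall c.toNat (List.mem_map_of_mem hc)
    rcases hc3 with hle | ⟨heq, hskipfree⟩
    · exact pvCharStep_eq skip index c hi hc1 hc2 hle hallow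
    · exact pvCharStep_eq52 skip index c hi hc1 hc2 heq
        (fun ch hch => hskipfree ch.toNat (List.mem_map_of_mem hch))
  rw [hmap, List.map_map]
  simp only [Function.comp_def, String.toList_singleton]
  rw [show (fun c => [((pvAllowed skip).getD
        (PySem.Int.mod ((((pvAllowed skip).countP (fun a => a ≤ c) : Nat) : Int) + index - 1)
          ((pvAllowed skip).length : Int)).toNat 'a')])
      = (fun x => [x]) ∘ (fun c => ((pvAllowed skip).getD
        (PySem.Int.mod ((((pvAllowed skip).countP (fun a => a ≤ c) : Nat) : Int) + index - 1)
          ((pvAllowed skip).length : Int)).toNat 'a')) from rfl]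
  rw [← List.map_map]
  rw [show ("" : String).toList = [] from rfl]
  rw [PySem.Chars.join_nil_singletons]
  simp [String.toList_ofList]
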